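-- pv_equiv track=rewrite | github.com/ifujisawa/proc-bench | proc_bench/generators.py | substitute_string
-- ===== SOURCE A (Python) =====
-- def substitute_string(_string, table):
--     result = list(_string)
--     intermediate_states = []
--
--     for i, char in enumerate(result):
--         if char in table.keys():
--             result[i] = table[char]
--         intermediate_states.append(''.join(result))
--
--     return [_string] + intermediate_states
-- ===== SOURCE B (Python) =====
-- def substitute_string(_string, table):
--     subst = [table.get(c, c) for c in _string]
--     states = [''.join(subst[:i + 1]) + _string[i + 1:] for i in range(len(_string))]
--     return [_string] + states
-- ===== Notes on version B (the rewrite author's own statement) =====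
-- stated objective: simpler
-- what changed: A's interleaved loop that mutates the list in place and re-joins it at every step is split into a single substitution pass followed by a prefix/suffix emission pass (substituted prefix joined once per index, original suffix taken from the untouched input string).
import Mathlib
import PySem

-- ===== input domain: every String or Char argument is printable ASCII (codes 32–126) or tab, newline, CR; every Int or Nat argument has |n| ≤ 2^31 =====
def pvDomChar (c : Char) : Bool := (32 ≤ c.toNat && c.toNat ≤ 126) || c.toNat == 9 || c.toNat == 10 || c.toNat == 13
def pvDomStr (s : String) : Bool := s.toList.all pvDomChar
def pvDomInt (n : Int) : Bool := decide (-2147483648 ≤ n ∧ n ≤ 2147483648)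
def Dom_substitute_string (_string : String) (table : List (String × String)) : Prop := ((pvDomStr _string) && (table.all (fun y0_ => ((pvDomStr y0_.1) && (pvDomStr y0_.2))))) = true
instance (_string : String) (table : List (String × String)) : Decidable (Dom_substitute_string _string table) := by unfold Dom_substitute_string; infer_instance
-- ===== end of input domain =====

-- B replaces A's interleaved substitute-and-join mutation loop by a single substitution pass
-- followed by a prefix/suffix emission pass (objective: simpler decomposition; same O(n^2) cost).

-- ===== PORT A =====
-- A's for-loop over the mutable `result` list, as structural recursion:
-- `done` is the already-visited (substituted) prefix, the argument list the not-yet-visited cells.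
def substituteLoop (d : PySem.Dict String String) (done : List String) : List String → List String
  | [] => []
  | char :: rest =>
    let cell := match d.get? char with
      | some v => v
      | none => char
    PySem.Str.join "" (done ++ cell :: rest) :: substituteLoop d (done ++ [cell]) rest

def substitute_string (_string : String) (table : List (String × String)) : List String :=
  let d := PySem.Dict.ofList table
  let result := _string.toList.map (fun c => String.ofList [c])
  _string :: substituteLoop d [] result

-- ===== PORT B =====
def substitute_string_alt (_string : String) (table : List (String × String)) : List String :=
  let d := PySem.Dict.ofList table
  let subst := _string.toList.map (fun c => d.getD (String.ofList [c]) (String.ofList [c]))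
  let states := (List.range _string.toList.length).map (fun (i : Nat) =>
    PySem.Str.join "" (PySem.List.slice subst none (some ((i : Int) + 1)))
      ++ PySem.Str.slice _string (some ((i : Int) + 1)) none)
  _string :: states

-- ===== PRECONDITION & SPEC =====
def Spec_substitute_string (_string : String) (table : List (String × String)) (out : List String) : Prop := out = substitute_string_alt _string table
instance (_string : String) (table : List (String × String)) (out : List String) : Decidable (Spec_substitute_string _string table out) := by unfold Spec_substitute_string; infer_instance

-- ===== CLAIM (what is proved, stated in full; the proofs are below) =====
def Claim_equal_substitute_string : Prop := ∀ (_string : String) (table : List (String × String)), Dom_substitute_string _string table → Spec_substitute_string _string table (substitute_string _string table)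

-- ===== LEMMAS AND PROOFS =====

-- ''.join with empty separator concatenates the parts
theorem charsJoin_nil_flatten (parts : List (List Char)) : PySem.Chars.join [] parts = parts.flatten := by
  induction parts with
  | nil => simp [PySem.Chars.join, List.intercalate]
  | cons p rest ih =>
    cases rest with
    | nil => simp [PySem.Chars.join, List.intercalate]
    | cons q r => rw [PySem.Chars.join_cons_cons]; simp_all

theorem join_empty_toList (parts : List String) :
    (PySem.Str.join "" parts).toList = (parts.map String.toList).flatten := by
  have h : ("" : String).toList = [] := by simp
  rw [PySem.Str.toList_join, h, charsJoin_nil_flatten]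

theorem singletons_flatten (cs : List Char) :
    (List.map (fun (x : Char) => [x]) cs).flatten = cs := by
  rw [← List.flatMap_def]; exact List.flatMap_singleton' cs

-- the per-character substitution A performs, written as Dict.getD
def substOne (d : PySem.Dict String String) (c : Char) : String :=
  d.getD (String.ofList [c]) (String.ofList [c])

theorem substituteLoop_eq (d : PySem.Dict String String) (cs : List Char) :
    ∀ done : List String,
    substituteLoop d done (cs.map (fun c => String.ofList [c])) =
      (List.range cs.length).map (fun i =>
        PySem.Str.join "" (done ++ (cs.take (i + 1)).map (substOne d))
          ++ String.ofList (cs.drop (i + 1))) := by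
  induction cs with
  | nil => intro done; simp [substituteLoop]
  | cons c cs ih =>
    intro done
    have hcell : (match d.get? (String.ofList [c]) with
        | some v => v
        | none => String.ofList [c]) = substOne d c := by
      unfold substOne PySem.Dict.getD
      cases d.get? (String.ofList [c]) <;> rfl
    simp only [List.map_cons, substituteLoop, hcell, List.length_cons,
      List.range_succ_eq_map, List.map_map]
    refine List.cons_eq_cons.mpr ⟨?_, ?_⟩
    · apply String.toList_inj.mp
      simp only [join_empty_toList, String.toList_append, String.toList_ofList,
        List.map_append, List.map_cons, List.map_map, Function.comp_def,
        List.take_succ_cons, List.take_zero, List.drop_succ_cons, List.drop_zero,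
        List.flatten_append, List.flatten_cons, List.flatten_nil, singletons_flatten,
        List.map_nil, List.append_nil, List.append_assoc]
    · rw [ih (done ++ [substOne d c])]
      apply List.map_congr_left
      intro i _
      apply String.toList_inj.mp
      simp only [Function.comp_apply, join_empty_toList, String.toList_append,
        String.toList_ofList, List.map_append, List.map_cons, List.map_nil,
        List.take_succ_cons, List.drop_succ_cons, List.flatten_append,
        List.flatten_cons, List.flatten_nil, List.append_nil, List.append_assoc]

-- ===== VERDICT (by name: the statement is the Claim_ definition above) =====
theorem substitute_string_spec : Claim_equal_substitute_string := by
  intro s table _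
  unfold Spec_substitute_string substitute_string substitute_string_alt
  simp only []
  rw [substituteLoop_eq]
  apply congrArg (s :: ·)
  apply List.map_congr_left
  intro i _
  apply String.toList_inj.mp
  have h1 : ((i : Int) + 1) = ((i + 1 : Nat) : Int) := by push_cast; ring
  rw [h1]
  simp only [join_empty_toList, String.toList_append, String.toList_ofList,
    PySem.Str.toList_slice, PySem.Chars.slice_eq_listSlice,
    PySem.List.slice_to_natCast, PySem.List.slice_from_natCast,
    List.nil_append, List.map_take, List.map_map, Function.comp_def, substOne]
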